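-- pv_equiv track=rewrite | github.com/deepmindru-afk/opensre | app/utils/telegram_delivery.py | _strip_trailing_incomplete_tag
-- ===== SOURCE A (Python) =====
-- def _strip_trailing_incomplete_tag(chunk: str) -> str:
--     """Drop a trailing ``<``… fragment with no closing ``>``."""
--     while True:
--         last_lt = chunk.rfind("<")
--         if last_lt == -1:
--             return chunk
--         if ">" in chunk[last_lt:]:
--             return chunk
--         chunk = chunk[:last_lt].rstrip()
-- ===== SOURCE B (Python) =====
-- def _strip_trailing_incomplete_tag(chunk: str) -> str:
--     q = chunk.rfind(">")
--     p = chunk.find("<", q + 1)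
--     if p == -1:
--         return chunk
--     return chunk[:p].rstrip()
-- ===== Notes on version B (the rewrite author's own statement) =====
-- stated objective: simpler
-- what changed: Replaces A's truncate-and-rstrip loop (repeated rfind('<') scans) by two lookups - the last '>' then the first '<' after it - and a single final rstrip.
import Mathlib
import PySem

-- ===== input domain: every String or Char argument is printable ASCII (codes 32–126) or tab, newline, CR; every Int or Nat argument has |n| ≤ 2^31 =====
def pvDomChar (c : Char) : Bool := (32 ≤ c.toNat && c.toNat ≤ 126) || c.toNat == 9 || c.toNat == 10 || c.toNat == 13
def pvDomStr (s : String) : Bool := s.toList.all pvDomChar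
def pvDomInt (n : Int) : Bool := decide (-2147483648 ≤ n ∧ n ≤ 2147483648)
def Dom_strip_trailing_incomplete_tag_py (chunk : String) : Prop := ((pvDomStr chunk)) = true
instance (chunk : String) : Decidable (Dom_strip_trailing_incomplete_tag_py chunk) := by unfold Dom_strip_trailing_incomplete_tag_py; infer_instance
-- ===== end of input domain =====

-- ===== PORT A =====
-- B replaces A's truncate-and-rstrip loop by two scans (last '>' then first '<' after it) and one final rstrip; objective: simpler.

-- Helpers/lemmas the ports need (cited by termination proofs); everything else is below the claim block.
-- [c] is a prefix of cs.drop i exactly when cs[i] = c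
lemma pv_single_prefix (c : Char) (cs : List Char) (i : Nat) :
    [c] <+: cs.drop i ↔ cs[i]? = some c := by
  rw [← List.head?_drop]
  cases cs.drop i <;> simp [List.cons_prefix_iff]

-- rfind cs [c] is -1 when c has no occurrence, else the greatest occurrence index
lemma pv_rfind_go_spec (cs : List Char) (c : Char) (n : Nat) :
    (PySem.Chars.rfind.go cs [c] n = -1 ∧ ∀ i ≤ n, cs[i]? ≠ some c) ∨
    (∃ r : Nat, PySem.Chars.rfind.go cs [c] n = (r : Int) ∧ r ≤ n ∧ cs[r]? = some c ∧
       ∀ i, r < i → i ≤ n → cs[i]? ≠ some c) := by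
  induction n with
  | zero =>
    rw [PySem.Chars.rfind.go]
    by_cases h : [c].isPrefixOf cs
    · right
      refine ⟨0, by simp [h], le_refl 0, ?_, by omega⟩
      have := (List.isPrefixOf_iff_prefix).mp h
      simpa using (pv_single_prefix c cs 0).mp (by simpa using this)
    · left
      refine ⟨by simp [h], ?_⟩
      intro i hi
      interval_cases i
      intro hc
      exact h (List.isPrefixOf_iff_prefix.mpr (by simpa using (pv_single_prefix c cs 0).mpr hc))
  | succ n ih =>
    rw [PySem.Chars.rfind.go]
    by_cases h : [c].isPrefixOf (cs.drop (n + 1))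
    · right
      have hc : cs[n + 1]? = some c :=
        (pv_single_prefix c cs (n + 1)).mp ((List.isPrefixOf_iff_prefix).mp h)
      exact ⟨n + 1, by simp [h], le_refl _, hc, by omega⟩
    · have hno : cs[n + 1]? ≠ some c := fun hc =>
        h (List.isPrefixOf_iff_prefix.mpr ((pv_single_prefix c cs (n + 1)).mpr hc))
      rcases ih with ⟨he, hall⟩ | ⟨r, he, hr, hc, hmax⟩
      · left
        refine ⟨by simp [h, he], ?_⟩
        intro i hi
        rcases Nat.lt_or_ge i (n + 1) with h' | h'
        · exact hall i (by omega)
        · have : i = n + 1 := by omega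
          simpa [this] using hno
      · right
        refine ⟨r, by simp [h, he], by omega, hc, ?_⟩
        intro i hri hi
        rcases Nat.lt_or_ge i (n + 1) with h' | h'
        · exact hmax i hri (by omega)
        · have : i = n + 1 := by omega
          simpa [this] using hno

lemma pv_rfind_spec (cs : List Char) (c : Char) :
    (PySem.Chars.rfind cs [c] = -1 ∧ ∀ i : Nat, cs[i]? ≠ some c) ∨
    (∃ r : Nat, PySem.Chars.rfind cs [c] = (r : Int) ∧ r < cs.length ∧ cs[r]? = some c ∧
       ∀ i : Nat, r < i → cs[i]? ≠ some c) := by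
  rcases pv_rfind_go_spec cs c cs.length with ⟨he, hall⟩ | ⟨r, he, hr, hc, hmax⟩
  · left
    refine ⟨he, fun i hc => ?_⟩
    rcases Nat.lt_or_ge i cs.length with h' | h'
    · exact hall i (by omega) hc
    · simp [List.getElem?_eq_none h'] at hc
  · right
    have hrlt : r < cs.length := List.getElem?_eq_some_iff.mp hc |>.1
    refine ⟨r, he, hrlt, hc, fun i hri hc' => ?_⟩
    rcases Nat.lt_or_ge i cs.length with h' | h'
    · exact hmax i hri (by omega) hc'
    · simp [List.getElem?_eq_none h'] at hc'

lemma pv_rstrip_length_le (xs : List Char) :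
    (PySem.Chars.rstrip xs).length ≤ xs.length := by
  simpa [PySem.Chars.rstrip] using
    (List.length_dropWhile_le PySem.Chars.isspace xs.reverse).trans (by simp)

-- port of A's while-loop on the code-point list (structural: rfind '<', '>' in chunk[last_lt:], chunk[:last_lt].rstrip())
def stripA (cs : List Char) : List Char :=
  let l := PySem.Chars.rfind cs ['<']
  if hl : l = -1 then cs
  else if PySem.Chars.isIn ['>'] (PySem.Chars.slice cs (some l) none) then cs
  else stripA (PySem.Chars.rstrip (PySem.Chars.slice cs none (some l)))
termination_by cs.length
decreasing_by
  rcases pv_rfind_spec cs '<' with ⟨he, -⟩ | ⟨r, he, hr, -, -⟩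
  · exact absurd he hl
  · rw [he, PySem.Chars.slice_eq_listSlice, PySem.List.slice_to cs (by positivity)]
    calc (PySem.Chars.rstrip (List.take (r : Int).toNat cs)).length
        ≤ (List.take (r : Int).toNat cs).length := pv_rstrip_length_le _
      _ < cs.length := by simp; omega

def strip_trailing_incomplete_tag_py (chunk : String) : String :=
  String.ofList (stripA chunk.toList)

-- ===== PORT B =====
-- B on the code-point list: q = chunk.rfind('>'); p = chunk.find('<', q + 1); unchanged if p == -1 else chunk[:p].rstrip()
def stripB (cs : List Char) : List Char :=
  let q := PySem.Chars.rfind cs ['>']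
  let p := PySem.Chars.findFrom cs ['<'] (q + 1) none
  if p = -1 then cs
  else PySem.Chars.rstrip (PySem.Chars.slice cs none (some p))

def strip_trailing_incomplete_tag_py_alt (chunk : String) : String :=
  String.ofList (stripB chunk.toList)

-- ===== PRECONDITION & SPEC =====
def Spec_strip_trailing_incomplete_tag_py (chunk : String) (out : String) : Prop := out = strip_trailing_incomplete_tag_py_alt chunk
instance (chunk : String) (out : String) : Decidable (Spec_strip_trailing_incomplete_tag_py chunk out) := by unfold Spec_strip_trailing_incomplete_tag_py; infer_instance

-- ===== CLAIM (what is proved, stated in full; the proofs are below) =====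
def Claim_equal_strip_trailing_incomplete_tag_py : Prop := ∀ (chunk : String), Dom_strip_trailing_incomplete_tag_py chunk → Spec_strip_trailing_incomplete_tag_py chunk (strip_trailing_incomplete_tag_py chunk)

-- ===== LEMMAS AND PROOFS =====

-- find xs [c] = the first occurrence index of c (determinacy, from the PySem find lemmas)
lemma pv_find_eq (xs : List Char) (c : Char) (r : Nat)
    (h1 : xs[r]? = some c) (h2 : ∀ i < r, xs[i]? ≠ some c) :
    PySem.Chars.find xs [c] = (r : Int) := by
  have hmem : c ∈ xs := List.mem_iff_getElem?.mpr ⟨r, h1⟩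
  have hpos : 0 ≤ PySem.Chars.find xs [c] :=
    (PySem.Chars.find_nonneg_iff xs [c]).mpr ((List.singleton_infix_iff c xs).mpr hmem)
  obtain ⟨hpre, hmin⟩ := PySem.Chars.find_spec hpos
  have hf : xs[(PySem.Chars.find xs [c]).toNat]? = some c := (pv_single_prefix c xs _).mp hpre
  have heq : (PySem.Chars.find xs [c]).toNat = r := by
    rcases lt_trichotomy (PySem.Chars.find xs [c]).toNat r with h' | h' | h'
    · exact absurd hf (h2 _ h')
    · exact h'
    · exact absurd ((pv_single_prefix c xs r).mpr h1) (hmin r h')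
  rw [← Int.toNat_of_nonneg hpos, heq]

lemma pv_find_neg (xs : List Char) (c : Char) (h : ∀ i : Nat, xs[i]? ≠ some c) :
    PySem.Chars.find xs [c] = -1 := by
  rw [PySem.Chars.find_eq_neg_one_iff, List.singleton_infix_iff, List.mem_iff_getElem?]
  rintro ⟨i, hi⟩
  exact h i hi

lemma pv_findFrom_neg (cs : List Char) (c : Char) (k : Nat) (hk : k ≤ cs.length)
    (h : ∀ i : Nat, k ≤ i → cs[i]? ≠ some c) :
    PySem.Chars.findFrom cs [c] (k : Int) none = -1 := by
  rw [PySem.Chars.findFrom_natCast cs [c] k hk]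
  have : PySem.Chars.find (cs.drop k) [c] = -1 := by
    apply pv_find_neg
    intro i
    rw [List.getElem?_drop]
    exact h (k + i) (by omega)
  simp [this]

lemma pv_findFrom_eq (cs : List Char) (c : Char) (k r : Nat) (hk : k ≤ cs.length)
    (hr : k ≤ r) (h1 : cs[r]? = some c) (h2 : ∀ i : Nat, k ≤ i → i < r → cs[i]? ≠ some c) :
    PySem.Chars.findFrom cs [c] (k : Int) none = (r : Int) := by
  rw [PySem.Chars.findFrom_natCast cs [c] k hk]
  have hfind : PySem.Chars.find (cs.drop k) [c] = ((r - k : Nat) : Int) := by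
    apply pv_find_eq
    · rw [List.getElem?_drop, show k + (r - k) = r by omega]
      exact h1
    · intro i hi
      rw [List.getElem?_drop]
      exact h2 (k + i) (by omega) (by omega)
  rw [hfind]
  have : ((r - k : Nat) : Int) ≠ -1 := by omega
  simp only [this, if_false]
  push_cast [Nat.cast_sub hr]
  ring

-- rfind only depends on the set of occurrence indices
lemma pv_rfind_congr (cs cs' : List Char) (c : Char)
    (h : ∀ i : Nat, cs'[i]? = some c ↔ cs[i]? = some c) :
    PySem.Chars.rfind cs' [c] = PySem.Chars.rfind cs [c] := by
  rcases pv_rfind_spec cs' c with ⟨he', hall'⟩ | ⟨r', he', _, hc', hmax'⟩ <;>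
    rcases pv_rfind_spec cs c with ⟨he, hall⟩ | ⟨r, he, _, hc, hmax⟩
  · rw [he, he']
  · exact absurd ((h r).mpr hc) (hall' r)
  · exact absurd ((h r').mp hc') (hall r')
  · rw [he, he']
    have h1 : ¬ r < r' := fun hlt => hmax r' hlt ((h r').mp hc')
    have h2 : ¬ r' < r := fun hlt => hmax' r hlt ((h r).mpr hc)
    omega

-- trailing-space decomposition of rstrip
lemma pv_rstrip_decomp (xs : List Char) :
    ∃ ws, xs = PySem.Chars.rstrip xs ++ ws ∧ ∀ x ∈ ws, PySem.Chars.isspace x = true := by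
  refine ⟨(xs.reverse.takeWhile PySem.Chars.isspace).reverse, ?_, ?_⟩
  · simp only [PySem.Chars.rstrip, ← List.reverse_append]
    rw [List.takeWhile_append_dropWhile, List.reverse_reverse]
  · intro x hx
    exact List.mem_takeWhile_imp (List.mem_reverse.mp hx)

lemma pv_rstrip_append_spaces (xs ws : List Char) (h : ∀ x ∈ ws, PySem.Chars.isspace x = true) :
    PySem.Chars.rstrip (xs ++ ws) = PySem.Chars.rstrip xs := by
  have hnil : ws.reverse.dropWhile PySem.Chars.isspace = [] :=
    List.dropWhile_eq_nil_iff.mpr (fun x hx => h x (List.mem_reverse.mp hx))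
  simp [PySem.Chars.rstrip, List.dropWhile_append, hnil]

lemma pv_rstrip_rstrip (xs : List Char) :
    PySem.Chars.rstrip (PySem.Chars.rstrip xs) = PySem.Chars.rstrip xs := by
  simp [PySem.Chars.rstrip, List.reverse_reverse, List.dropWhile_idempotent]

-- occurrence of '>' in a tail, as indices
lemma pv_isIn_drop_false (cs : List Char) (c : Char) (r : Nat)
    (h : PySem.Chars.isIn [c] (cs.drop r) = false) :
    ∀ j : Nat, r ≤ j → cs[j]? ≠ some c := by
  intro j hj hc
  rw [PySem.Chars.isIn_eq_false_iff, List.singleton_infix_iff] at h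
  exact h (List.mem_iff_getElem?.mpr ⟨j - r, by rw [List.getElem?_drop, show r + (j - r) = j by omega]; exact hc⟩)

lemma pv_isIn_drop_true (cs : List Char) (c : Char) (r : Nat)
    (h : PySem.Chars.isIn [c] (cs.drop r) = true) :
    ∃ j : Nat, r ≤ j ∧ cs[j]? = some c := by
  rw [PySem.Chars.isIn_iff_infix, List.singleton_infix_iff, List.mem_iff_getElem?] at h
  obtain ⟨i, hi⟩ := h
  exact ⟨r + i, by omega, by rw [← List.getElem?_drop]; exact hi⟩

-- evaluation of stripB once the two scans are known
lemma pv_stripB_of_none (cs : List Char) (k : Nat)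
    (hk : PySem.Chars.rfind cs ['>'] + 1 = (k : Int)) (hklen : k ≤ cs.length)
    (h : ∀ i : Nat, k ≤ i → cs[i]? ≠ some '<') : stripB cs = cs := by
  simp only [stripB]
  rw [hk, pv_findFrom_neg cs '<' k hklen h]
  simp

lemma pv_stripB_of_found (cs : List Char) (k p : Nat)
    (hk : PySem.Chars.rfind cs ['>'] + 1 = (k : Int)) (hklen : k ≤ cs.length)
    (hkp : k ≤ p) (h1 : cs[p]? = some '<')
    (h2 : ∀ i : Nat, k ≤ i → i < p → cs[i]? ≠ some '<') :
    stripB cs = PySem.Chars.rstrip (cs.take p) := by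
  simp only [stripB]
  rw [hk, pv_findFrom_eq cs '<' k p hklen hkp h1 h2]
  have hne : ((p : Nat) : Int) ≠ -1 := by omega
  rw [if_neg hne, PySem.Chars.slice_eq_listSlice, PySem.List.slice_to cs (by positivity)]
  simp

-- the main equivalence, by strong induction on the length
lemma pv_stripAB (n : Nat) : ∀ cs : List Char, cs.length ≤ n → stripA cs = stripB cs := by
  induction n with
  | zero =>
    intro cs hcs
    have h0 : cs = [] := List.eq_nil_of_length_eq_zero (by omega)
    subst h0
    rw [stripA, dif_pos (by decide)]
    decide
  | succ n ih =>
    intro cs hcs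
    rcases pv_rfind_spec cs '<' with ⟨hlneg, hlnone⟩ | ⟨r, hrf, hrlen, hrc, hrmax⟩
    · -- no '<' at all: both sides return cs
      rw [stripA, dif_pos hlneg]
      rcases pv_rfind_spec cs '>' with ⟨hq, -⟩ | ⟨rq, hq, hqlen, -, -⟩
      · exact (pv_stripB_of_none cs 0 (by rw [hq]; norm_num) (by omega)
          (fun i _ => hlnone i)).symm
      · exact (pv_stripB_of_none cs (rq + 1) (by rw [hq]; push_cast; ring) (by omega)
          (fun i _ => hlnone i)).symm
    · have hsl : PySem.Chars.slice cs (some (PySem.Chars.rfind cs ['<'])) none = cs.drop r := by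
        rw [hrf, PySem.Chars.slice_eq_listSlice, PySem.List.slice_from cs (by positivity)]
        simp
      by_cases hgt : PySem.Chars.isIn ['>'] (PySem.Chars.slice cs (some (PySem.Chars.rfind cs ['<'])) none) = true
      · -- the last '<' is closed: both sides return cs
        rw [stripA, dif_neg (by rw [hrf]; omega), if_pos hgt]
        rw [hsl] at hgt
        obtain ⟨j, hrj, hj⟩ := pv_isIn_drop_true cs '>' r hgt
        rcases pv_rfind_spec cs '>' with ⟨-, hqnone⟩ | ⟨rq, hq, hqlen, hqc, hqmax⟩
        · exact absurd hj (hqnone j)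
        · have hjrq : j ≤ rq := by
            by_contra h'
            exact hqmax j (by omega) hj
          refine (pv_stripB_of_none cs (rq + 1) (by rw [hq]; push_cast; ring) (by omega) ?_).symm
          intro i hi hc
          exact hrmax i (by omega) hc
      · -- the last '<' is unclosed: A truncates and recurses
        have hAstep : stripA cs = stripA (PySem.Chars.rstrip (cs.take r)) := by
          rw [stripA, dif_neg (by rw [hrf]; omega), if_neg hgt, hrf,
            PySem.Chars.slice_eq_listSlice, PySem.List.slice_to cs (by positivity)]
          simp
        rw [hsl] at hgt
        have hnogt : ∀ j : Nat, r ≤ j → cs[j]? ≠ some '>' :=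
          pv_isIn_drop_false cs '>' r (Bool.not_eq_true _ ▸ (by simpa using hgt))
        -- decompose the rstripped prefix
        set cs' := PySem.Chars.rstrip (cs.take r) with hcs'
        obtain ⟨ws, hws, hwssp⟩ := pv_rstrip_decomp (cs.take r)
        rw [← hcs'] at hws
        set t := cs'.length with ht
        have htr : t + ws.length = r := by
          have := congrArg List.length hws
          simpa [List.length_take, Nat.min_eq_left (le_of_lt hrlen)] using this.symm
        -- occurrences of a non-space character transfer between cs and cs'
        have hocc : ∀ c' : Char, PySem.Chars.isspace c' = false →
            ∀ i : Nat, cs'[i]? = some c' ↔ (cs[i]? = some c' ∧ i < t) := by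
          intro c' hsp i
          constructor
          · intro hc
            have hit : i < t := (List.getElem?_eq_some_iff.mp hc).1
            refine ⟨?_, hit⟩
            have : (cs.take r)[i]? = some c' := by
              rw [hws, List.getElem?_append, if_pos hit]
              exact hc
            rwa [List.getElem?_take, if_pos (by omega)] at this
          · rintro ⟨hc, hit⟩
            have : (cs.take r)[i]? = some c' := by
              rw [List.getElem?_take, if_pos (by omega)]
              exact hc
            rw [hws, List.getElem?_append, if_pos hit] at this
            exact this
        -- every occurrence of a non-space character below r is below t
        have hlow : ∀ c' : Char, PySem.Chars.isspace c' = false →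
            ∀ i : Nat, cs[i]? = some c' → i < r → i < t := by
          intro c' hsp i hc hir
          by_contra h'
          have : (cs.take r)[i]? = some c' := by
            rw [List.getElem?_take, if_pos hir]
            exact hc
          rw [hws, List.getElem?_append, if_neg (by omega)] at this
          have := hwssp c' (List.mem_iff_getElem?.mpr ⟨i - t, this⟩)
          rw [hsp] at this
          exact Bool.false_ne_true this
        -- the last '>' is unchanged by the truncation
        have hqcongr : PySem.Chars.rfind cs' ['>'] = PySem.Chars.rfind cs ['>'] := by
          apply pv_rfind_congr
          intro i
          rw [hocc '>' (by decide) i]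
          constructor
          · exact fun h => h.1
          · intro hc
            have hir : i < r := by
              by_contra h'
              exact hnogt i (by omega) hc
            exact ⟨hc, hlow '>' (by decide) i hc hir⟩
        -- k = q + 1 with k ≤ t
        have hkex : ∃ k : Nat, PySem.Chars.rfind cs ['>'] + 1 = (k : Int) ∧ k ≤ t := by
          rcases pv_rfind_spec cs '>' with ⟨hq, -⟩ | ⟨rq, hq, hqlen, hqc, -⟩
          · exact ⟨0, by rw [hq]; norm_num, by omega⟩
          · have hrqr : rq < r := by
              by_contra h'
              exact hnogt rq (by omega) hqc
            exact ⟨rq + 1, by rw [hq]; push_cast; ring, hlow '>' (by decide) rq hqc hrqr⟩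
        obtain ⟨k, hkq, hkt⟩ := hkex
        have hktr : k ≤ r := by omega
        -- p = the first '<' at or after k
        have hPex : ∃ i : Nat, k ≤ i ∧ cs[i]? = some '<' := ⟨r, hktr, hrc⟩
        set p := Nat.find hPex with hp
        obtain ⟨hkp, hpc⟩ := Nat.find_spec hPex
        have hpmin : ∀ i : Nat, k ≤ i → i < p → cs[i]? ≠ some '<' := by
          intro i hki hip hc
          exact Nat.find_min hPex hip ⟨hki, hc⟩
        have hpr : p ≤ r := Nat.find_le ⟨hktr, hrc⟩
        have hBcs : stripB cs = PySem.Chars.rstrip (cs.take p) :=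
          pv_stripB_of_found cs k p hkq (by omega) hkp hpc hpmin
        -- B gives the same on cs'
        have hBcs' : stripB cs' = PySem.Chars.rstrip (cs.take p) := by
          rcases Nat.lt_or_ge p t with hpt | htp
          · -- the first unclosed '<' survives the truncation
            have hpr' : p < r := by omega
            have h1' : cs'[p]? = some '<' := (hocc '<' (by decide) p).mpr ⟨hpc, hpt⟩
            have h2' : ∀ i : Nat, k ≤ i → i < p → cs'[i]? ≠ some '<' := by
              intro i hki hip hc
              exact hpmin i hki hip ((hocc '<' (by decide) i).mp hc).1
            rw [pv_stripB_of_found cs' k p (by rw [hqcongr]; exact hkq) (by omega) hkp h1' h2']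
            congr 1
            calc cs'.take p = (cs' ++ ws).take p := (List.take_append_of_le_length (by omega)).symm
              _ = (cs.take r).take p := by rw [hws]
              _ = cs.take p := by rw [List.take_take, Nat.min_eq_left (by omega)]
          · -- the truncated part was '<'-free up to spaces: B leaves cs' alone
            have hnone' : ∀ i : Nat, k ≤ i → cs'[i]? ≠ some '<' := by
              intro i hki hc
              have hit : i < t := (List.getElem?_eq_some_iff.mp hc).1
              have hple : p ≤ i := Nat.find_le (hn := ⟨hki, ((hocc '<' (by decide) i).mp hc).1⟩)
              omega
            rw [pv_stripB_of_none cs' k (by rw [hqcongr]; exact hkq) (by omega) hnone']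
            have htake : cs.take p = cs' ++ ws.take (p - t) := by
              calc cs.take p = (cs.take r).take p := by rw [List.take_take, Nat.min_eq_left hpr]
                _ = (cs' ++ ws).take p := by rw [hws]
                _ = cs' ++ ws.take (p - t) := by
                      rw [List.take_append, List.take_of_length_le (by omega)]
            rw [htake, pv_rstrip_append_spaces cs' (ws.take (p - t))
              (fun x hx => hwssp x (List.mem_of_mem_take hx)), hcs', pv_rstrip_rstrip]
        rw [hAstep, ih cs' (by have := pv_rstrip_length_le (cs.take r); simp [hcs'] at *; omega), hBcs, hBcs']

-- ===== VERDICT (by name: the statement is the Claim_ definition above) =====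
theorem strip_trailing_incomplete_tag_py_spec : Claim_equal_strip_trailing_incomplete_tag_py := by
  intro chunk _
  unfold Spec_strip_trailing_incomplete_tag_py strip_trailing_incomplete_tag_py strip_trailing_incomplete_tag_py_alt
  rw [pv_stripAB chunk.toList.length chunk.toList le_rfl]
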